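-- pv_equiv track=rewrite | github.com/zzofrea/workflow-platform | src/workflow_platform/health.py | _find_container_status
-- ===== SOURCE A (Python) =====
-- def _find_container_status(expected: str, statuses: dict[str, str]) -> str:
--     """Find status for an expected container using flexible name matching.
--
--     Docker Swarm appends suffixes (``dokploy.1.k8u2c7n14id8``).
--     We try three strategies in order: exact match, prefix match,
--     then substring match.
--     """
--     if expected in statuses:
--         return statuses[expected]
--     for actual_name, status in statuses.items():
--         if actual_name.startswith(expected):
--             return status
--     for actual_name, status in statuses.items():
--         if expected in actual_name:
--             return status
--     return ""
-- ===== SOURCE B (Python) =====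
-- def _find_container_status(expected: str, statuses: dict[str, str]) -> str:
--     """Single pass: return immediately on an exact key; otherwise remember the
--     first prefix match and the first substring match, then pick by priority."""
--     first_prefix = None
--     first_substring = None
--     for actual_name, status in statuses.items():
--         if actual_name == expected:
--             return status
--         if first_prefix is None and actual_name.startswith(expected):
--             first_prefix = status
--         if first_substring is None and expected in actual_name:
--             first_substring = status
--     if first_prefix is not None:
--         return first_prefix
--     if first_substring is not None:
--         return first_substring
--     return ""
-- ===== Notes on version B (the rewrite author's own statement) =====
-- stated objective: alternative
-- what changed: Replaces A's three sequential scans (exact lookup, prefix loop, substring loop) with a single pass that early-returns on an exact key and tracks the first prefix and first substring candidates in two variables, choosing by priority after the loop.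
import Mathlib
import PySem

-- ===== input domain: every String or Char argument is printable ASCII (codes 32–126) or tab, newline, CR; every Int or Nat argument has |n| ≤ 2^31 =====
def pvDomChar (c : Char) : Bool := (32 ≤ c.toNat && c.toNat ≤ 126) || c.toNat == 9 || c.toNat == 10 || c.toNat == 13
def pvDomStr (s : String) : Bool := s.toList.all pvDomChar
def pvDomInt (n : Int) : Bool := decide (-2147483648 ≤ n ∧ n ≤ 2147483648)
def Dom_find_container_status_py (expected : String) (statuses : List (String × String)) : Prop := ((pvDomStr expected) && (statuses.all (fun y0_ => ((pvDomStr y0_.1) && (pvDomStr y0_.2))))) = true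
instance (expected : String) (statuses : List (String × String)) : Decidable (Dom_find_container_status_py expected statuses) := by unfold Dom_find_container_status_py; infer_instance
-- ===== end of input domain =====

-- B replaces A's three sequential scans with a single pass that early-returns on an
-- exact key and tracks the first prefix/substring candidates (objective: alternative).


-- ===== PORT A =====
-- 'expected in statuses' / 'statuses[expected]': first-match lookup on the assoc list
def pvExactGet (expected : String) : List (String × String) → Option String
  | [] => none
  | (n, s) :: rest => if n == expected then some s else pvExactGet expected rest

-- A's second loop: substring scan, '' if none
def pvASubLoop (expected : String) : List (String × String) → String
  | [] => ""
  | (n, s) :: rest => if PySem.Str.isIn expected n then s else pvASubLoop expected rest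

-- A's first loop: prefix scan, falling through to the substring scan over the WHOLE dict
def pvAPrefixLoop (expected : String) (statuses : List (String × String)) : List (String × String) → String
  | [] => pvASubLoop expected statuses
  | (n, s) :: rest => if PySem.Str.startswith n expected then s else pvAPrefixLoop expected statuses rest

def find_container_status_py (expected : String) (statuses : List (String × String)) : String :=
  match pvExactGet expected statuses with
  | some s => s
  | none => pvAPrefixLoop expected statuses statuses

-- ===== PORT B =====
-- single pass: early return on exact key; remember first prefix / first substring match
def pvBLoop (expected : String) (firstPrefix firstSubstring : Option String) : List (String × String) → String
  | [] =>
    match firstPrefix with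
    | some s => s
    | none =>
      match firstSubstring with
      | some s => s
      | none => ""
  | (n, s) :: rest =>
    if n == expected then s
    else
      pvBLoop expected
        (if firstPrefix.isNone && PySem.Str.startswith n expected then some s else firstPrefix)
        (if firstSubstring.isNone && PySem.Str.isIn expected n then some s else firstSubstring)
        rest

def find_container_status_py_alt (expected : String) (statuses : List (String × String)) : String :=
  pvBLoop expected none none statuses

-- ===== PRECONDITION & SPEC =====
def Spec_find_container_status_py (expected : String) (statuses : List (String × String)) (out : String) : Prop := out = find_container_status_py_alt expected statuses
instance (expected : String) (statuses : List (String × String)) (out : String) : Decidable (Spec_find_container_status_py expected statuses out) := by unfold Spec_find_container_status_py; infer_instance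

-- ===== CLAIM (what is proved, stated in full; the proofs are below) =====
def Claim_equal_find_container_status_py : Prop := ∀ (expected : String) (statuses : List (String × String)), Dom_find_container_status_py expected statuses → Spec_find_container_status_py expected statuses (find_container_status_py expected statuses)

-- ===== LEMMAS AND PROOFS =====
-- first prefix-match status in a list, as an Option
def pvFindP (expected : String) : List (String × String) → Option String
  | [] => none
  | (n, s) :: rest => if PySem.Str.startswith n expected then some s else pvFindP expected rest

-- first substring-match status in a list, as an Option
def pvFindS (expected : String) : List (String × String) → Option String
  | [] => none
  | (n, s) :: rest => if PySem.Str.isIn expected n then some s else pvFindS expected rest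

theorem pvASubLoop_eq (expected : String) (l : List (String × String)) :
    pvASubLoop expected l = (pvFindS expected l).getD "" := by
  induction l with
  | nil => rfl
  | cons p rest ih =>
    obtain ⟨n, s⟩ := p
    simp only [pvASubLoop, pvFindS]
    split <;> simp [ih]

theorem pvAPrefixLoop_eq (expected : String) (S : List (String × String)) (l : List (String × String)) :
    pvAPrefixLoop expected S l =
      match pvFindP expected l with
      | some s => s
      | none => pvASubLoop expected S := by
  induction l with
  | nil => rfl
  | cons p rest ih =>
    obtain ⟨n, s⟩ := p
    simp only [pvAPrefixLoop, pvFindP]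
    split <;> simp [ih]

theorem pvBLoop_eq (expected : String) (l : List (String × String)) :
    ∀ (fp fs : Option String),
      pvBLoop expected fp fs l =
        match pvExactGet expected l with
        | some s => s
        | none =>
          match fp.or (pvFindP expected l) with
          | some s => s
          | none => (fs.or (pvFindS expected l)).getD "" := by
  induction l with
  | nil =>
    intro fp fs
    simp only [pvBLoop, pvExactGet, pvFindP, pvFindS, Option.or_none]
    cases fp <;> cases fs <;> rfl
  | cons p rest ih =>
    intro fp fs
    obtain ⟨n, s⟩ := p
    simp only [pvBLoop, pvExactGet, pvFindP, pvFindS]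
    by_cases hx : (n == expected) = true
    · simp [hx]
    · simp only [hx, if_neg, Bool.false_eq_true, not_false_eq_true, ih]
      have hfp : (if fp.isNone && PySem.Str.startswith n expected then some s else fp).or
          (pvFindP expected rest) =
          fp.or (if PySem.Str.startswith n expected then some s else pvFindP expected rest) := by
        cases fp <;> cases hps : PySem.Str.startswith n expected <;> simp
      have hfs : (if fs.isNone && PySem.Str.isIn expected n then some s else fs).or
          (pvFindS expected rest) =
          fs.or (if PySem.Str.isIn expected n then some s else pvFindS expected rest) := by
        cases fs <;> cases hss : PySem.Str.isIn expected n <;> simp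
      rw [hfp, hfs]

-- ===== VERDICT (by name: the statement is the Claim_ definition above) =====
theorem find_container_status_py_spec : Claim_equal_find_container_status_py := by
  intro expected statuses _
  unfold Spec_find_container_status_py find_container_status_py find_container_status_py_alt
  rw [pvBLoop_eq]
  cases hx : pvExactGet expected statuses with
  | some s => rfl
  | none =>
    rw [pvAPrefixLoop_eq, pvASubLoop_eq]
    simp only [Option.none_or]
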